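-- pv_equiv track=rewrite | github.com/ladymarengo/advent-of-code | aoc2015-13.py | count_happiness
-- ===== SOURCE A (Python) =====
-- def count_happiness(arrangements, happiness_dict):
--     list_of_happiness = []
--     for arrangement in arrangements:
--         counter = 0
--         for i in range(len(arrangement)):
--             guest = happiness_dict[arrangement[i]]
--             if i == len(arrangement) - 1:
--                 counter += guest[arrangement[0]]
--                 counter += guest[arrangement[i-1]]
--             elif i == 0:
--                 counter += guest[arrangement[i+1]]
--                 counter += guest[arrangement[-1]]
--             else:
--                 counter += guest[arrangement[i+1]]
--                 counter += guest[arrangement[i-1]]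
--         list_of_happiness.append(counter)
--     return list_of_happiness
-- ===== SOURCE B (Python) =====
-- def count_happiness(arrangements, happiness_dict):
--     def both(x, y):
--         return happiness_dict[x][y] + happiness_dict[y][x]
--
--     def chain(guests):
--         if len(guests) < 2:
--             return 0
--         return both(guests[0], guests[1]) + chain(guests[1:])
--
--     return [chain(a) + both(a[-1], a[0]) if a else 0 for a in arrangements]
-- ===== Notes on version B (the rewrite author's own statement) =====
-- stated objective: alternative
-- what changed: Replaces A's indexed accumulator loop with three wrap-around branches by a staged recursive decomposition: a structural recursion sums both directed values along the open chain of consecutive guests, and the single closing edge last-first is added separately.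
import Mathlib
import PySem

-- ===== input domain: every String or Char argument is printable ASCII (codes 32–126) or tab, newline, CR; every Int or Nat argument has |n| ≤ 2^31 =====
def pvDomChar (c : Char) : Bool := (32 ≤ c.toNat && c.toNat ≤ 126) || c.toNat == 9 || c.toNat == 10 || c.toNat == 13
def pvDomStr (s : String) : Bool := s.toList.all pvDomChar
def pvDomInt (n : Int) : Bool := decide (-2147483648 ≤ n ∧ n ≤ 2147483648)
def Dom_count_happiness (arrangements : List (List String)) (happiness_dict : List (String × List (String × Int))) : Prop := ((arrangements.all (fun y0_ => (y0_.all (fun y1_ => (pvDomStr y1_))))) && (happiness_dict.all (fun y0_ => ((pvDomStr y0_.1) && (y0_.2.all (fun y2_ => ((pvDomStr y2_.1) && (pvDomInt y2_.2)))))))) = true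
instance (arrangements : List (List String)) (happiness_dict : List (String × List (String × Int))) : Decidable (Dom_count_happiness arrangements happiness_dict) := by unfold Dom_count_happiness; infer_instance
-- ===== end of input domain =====

-- B replaces A's indexed accumulator loop with wrap-around branches by a staged recursive
-- decomposition: a structural recursion over the open chain of consecutive guests plus the
-- one closing edge added separately; objective: alternative.

-- ===== PORT A =====
def count_happiness (arrangements : List (List String)) (happiness_dict : List (String × List (String × Int))) : List Int :=
  arrangements.foldl (fun list_of_happiness arrangement =>
    let n : Int := arrangement.length
    let counter := (PySem.List.pyRange 0 n 1).foldl (fun counter i =>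
      let guest := ((PySem.Dict.mk happiness_dict).get? (PySem.List.pyGetD arrangement i "")).getD []
      if i = n - 1 then
        counter + ((PySem.Dict.mk guest).get? (PySem.List.pyGetD arrangement 0 "")).getD 0
                + ((PySem.Dict.mk guest).get? (PySem.List.pyGetD arrangement (i - 1) "")).getD 0
      else if i = 0 then
        counter + ((PySem.Dict.mk guest).get? (PySem.List.pyGetD arrangement (i + 1) "")).getD 0
                + ((PySem.Dict.mk guest).get? (PySem.List.pyGetD arrangement (-1) "")).getD 0
      else
        counter + ((PySem.Dict.mk guest).get? (PySem.List.pyGetD arrangement (i + 1) "")).getD 0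
                + ((PySem.Dict.mk guest).get? (PySem.List.pyGetD arrangement (i - 1) "")).getD 0) 0
    list_of_happiness ++ [counter]) []

-- ===== PORT B =====
-- happiness_dict[x][y] with defaults (Pre_ guarantees both lookups succeed)
def pvLook (happiness_dict : List (String × List (String × Int))) (x y : String) : Int :=
  ((PySem.Dict.mk (((PySem.Dict.mk happiness_dict).get? x).getD [])).get? y).getD 0

-- B's helper both(x, y)
def pvBoth (happiness_dict : List (String × List (String × Int))) (x y : String) : Int :=
  pvLook happiness_dict x y + pvLook happiness_dict y x

-- B's helper chain(guests): structural recursion over consecutive guests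
def pvChain (happiness_dict : List (String × List (String × Int))) : List String → Int
  | x :: y :: rest => pvBoth happiness_dict x y + pvChain happiness_dict (y :: rest)
  | _ => 0

def count_happiness_alt (arrangements : List (List String)) (happiness_dict : List (String × List (String × Int))) : List Int :=
  arrangements.map (fun a =>
    if a.isEmpty then 0
    else pvChain happiness_dict a + pvBoth happiness_dict (a.getLastD "") (a.headD ""))

-- ===== PRECONDITION & SPEC =====
-- both directed lookups for one adjacent pair succeed
def pvPairOK (happiness_dict : List (String × List (String × Int))) (a b : String) : Bool :=
  match (PySem.Dict.mk happiness_dict).get? a with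
  | some g => ((PySem.Dict.mk g).get? b).isSome
  | none => false

-- Pre_ excludes exactly the inputs on which Python A raises KeyError: some circular-adjacent
-- pair of guests (both directions) is missing from happiness_dict.
def Pre_count_happiness (arrangements : List (List String)) (happiness_dict : List (String × List (String × Int))) : Prop :=
  (arrangements.all (fun arrangement =>
    (arrangement.zip (arrangement.drop 1 ++ arrangement.take 1)).all
      (fun p => pvPairOK happiness_dict p.1 p.2 && pvPairOK happiness_dict p.2 p.1))) = true

instance (arrangements : List (List String)) (happiness_dict : List (String × List (String × Int))) : Decidable (Pre_count_happiness arrangements happiness_dict) := by unfold Pre_count_happiness; infer_instance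

def pvWitness_count_happiness : List (List String) × (List (String × List (String × Int))) :=
  ([["A", "B"]], [("A", [("B", 1)]), ("B", [("A", -2)])])

def Spec_count_happiness (arrangements : List (List String)) (happiness_dict : List (String × List (String × Int))) (out : List Int) : Prop := out = count_happiness_alt arrangements happiness_dict
instance (arrangements : List (List String)) (happiness_dict : List (String × List (String × Int))) (out : List Int) : Decidable (Spec_count_happiness arrangements happiness_dict out) := by unfold Spec_count_happiness; infer_instance

-- ===== CLAIM (what is proved, stated in full; the proofs are below) =====
def Claim_equal_count_happiness : Prop := ∀ (arrangements : List (List String)) (happiness_dict : List (String × List (String × Int))), Dom_count_happiness arrangements happiness_dict → Pre_count_happiness arrangements happiness_dict → Spec_count_happiness arrangements happiness_dict (count_happiness arrangements happiness_dict)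

-- ===== LEMMAS AND PROOFS =====

-- index of the circular successor / predecessor of position k in a list of length n
def pvNext (n k : Nat) : Nat := if k + 1 = n then 0 else k + 1
def pvPrev (n k : Nat) : Nat := if k = 0 then n - 1 else k - 1

theorem pvNext_pvPrev (n k : Nat) (hk : k < n) : pvNext n (pvPrev n k) = k := by
  unfold pvNext pvPrev; split_ifs <;> omega

-- the circular pair list, elementwise
theorem pv_zip_char (arr : List String) :
    arr.zip (arr.drop 1 ++ arr.take 1)
      = (List.range arr.length).map (fun k => (arr.getD k "", arr.getD (pvNext arr.length k) "")) := by
  apply List.ext_getElem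
  · simp [List.length_zip]; omega
  · intro j h1 h2
    have hj : j < arr.length := by simpa using h2
    have hlen1 : (arr.drop 1).length = arr.length - 1 := by simp
    simp only [List.getElem_zip, List.getElem_map, List.getElem_range, Prod.mk.injEq]
    refine ⟨?_, ?_⟩
    · simp [List.getD_eq_getElem?_getD, hj]
    · by_cases hcase : j < arr.length - 1
      · rw [List.getElem_append_left (by omega)]
        have hnx : pvNext arr.length j = j + 1 := by unfold pvNext; split_ifs <;> omega
        rw [hnx, List.getElem_drop]
        rw [List.getD_eq_getElem?_getD, List.getElem?_eq_getElem (by omega)]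
        simp only [Option.getD_some]
        congr 1
        omega
      · have hj' : j = arr.length - 1 := by omega
        rw [List.getElem_append_right (by omega)]
        have : pvNext arr.length j = 0 := by unfold pvNext; split_ifs <;> omega
        rw [this]
        have h0 : 0 < arr.length := by omega
        simp [hj', List.getD_eq_getElem?_getD, h0]

-- the permutation behind the rotation reindexing
theorem pv_range_map_prev_perm (n : Nat) :
    ((List.range n).map (pvPrev n)).Perm (List.range n) := by
  cases n with
  | zero => simp
  | succ m =>
    have h1 : (List.range (m + 1)).map (pvPrev (m + 1)) = m :: List.range m := by
      rw [List.range_succ_eq_map]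
      simp only [List.map_cons, List.map_map]
      refine congrArg₂ _ (by simp [pvPrev]) ?_
      have hmc : List.map (pvPrev (m + 1) ∘ Nat.succ) (List.range m) = List.map id (List.range m) :=
        List.map_congr_left (fun k _ => by simp [pvPrev, Function.comp])
      simpa using hmc
    have h2 : (List.range (m + 1)).Perm (m :: List.range m) := by
      rw [List.range_succ]
      exact List.perm_append_singleton _ _
    rw [h1]
    exact h2.symm

theorem pv_sum_rot (n : Nat) (F : Nat → Nat → Int) :
    ((List.range n).map (fun k => F k (pvPrev n k))).sum
      = ((List.range n).map (fun k => F (pvNext n k) k)).sum := by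
  have hcong : (List.range n).map (fun k => F k (pvPrev n k))
      = ((List.range n).map (pvPrev n)).map (fun j => F (pvNext n j) j) := by
    rw [List.map_map]
    apply List.map_congr_left
    intro k hk
    have hk' : k < n := List.mem_range.mp hk
    simp only [Function.comp]
    rw [pvNext_pvPrev n k hk']
  rw [hcong]
  exact ((pv_range_map_prev_perm n).map (fun j => F (pvNext n j) j)).sum_eq

-- the body of A's inner loop, named for the proofs
def pvAInner (hd : List (String × List (String × Int))) (arr : List String) : Int :=
  (PySem.List.pyRange 0 (arr.length : Int) 1).foldl (fun counter i =>
    let guest := ((PySem.Dict.mk hd).get? (PySem.List.pyGetD arr i "")).getD []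
    if i = (arr.length : Int) - 1 then
      counter + ((PySem.Dict.mk guest).get? (PySem.List.pyGetD arr 0 "")).getD 0
              + ((PySem.Dict.mk guest).get? (PySem.List.pyGetD arr (i - 1) "")).getD 0
    else if i = 0 then
      counter + ((PySem.Dict.mk guest).get? (PySem.List.pyGetD arr (i + 1) "")).getD 0
              + ((PySem.Dict.mk guest).get? (PySem.List.pyGetD arr (-1) "")).getD 0
    else
      counter + ((PySem.Dict.mk guest).get? (PySem.List.pyGetD arr (i + 1) "")).getD 0
              + ((PySem.Dict.mk guest).get? (PySem.List.pyGetD arr (i - 1) "")).getD 0) 0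

theorem count_happiness_eq (arrangements : List (List String)) (hd : List (String × List (String × Int))) :
    count_happiness arrangements hd = arrangements.foldl (fun acc arr => acc ++ [pvAInner hd arr]) [] := rfl

theorem pv_getLast_eq_getD (arr : List String) (h : arr ≠ []) :
    arr.getLast h = arr.getD (arr.length - 1) "" := by
  rw [List.getLast_eq_getElem]
  rw [List.getD_eq_getElem?_getD, List.getElem?_eq_getElem (by
    have := List.length_pos_iff.mpr h; omega)]
  simp

theorem pv_term (hd : List (String × List (String × Int))) (arr : List String) (c : Int) (k : Nat)
    (hk : k < arr.length) :
    (let guest := ((PySem.Dict.mk hd).get? (PySem.List.pyGetD arr (k : Int) "")).getD []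
     if (k : Int) = (arr.length : Int) - 1 then
       c + ((PySem.Dict.mk guest).get? (PySem.List.pyGetD arr 0 "")).getD 0
         + ((PySem.Dict.mk guest).get? (PySem.List.pyGetD arr ((k : Int) - 1) "")).getD 0
     else if (k : Int) = 0 then
       c + ((PySem.Dict.mk guest).get? (PySem.List.pyGetD arr ((k : Int) + 1) "")).getD 0
         + ((PySem.Dict.mk guest).get? (PySem.List.pyGetD arr (-1) "")).getD 0
     else
       c + ((PySem.Dict.mk guest).get? (PySem.List.pyGetD arr ((k : Int) + 1) "")).getD 0
         + ((PySem.Dict.mk guest).get? (PySem.List.pyGetD arr ((k : Int) - 1) "")).getD 0)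
    = c + (pvLook hd (arr.getD k "") (arr.getD (pvNext arr.length k) "")
         + pvLook hd (arr.getD k "") (arr.getD (pvPrev arr.length k) "")) := by
  have hne : arr ≠ [] := by intro h; subst h; simp at hk
  unfold pvLook
  simp only [PySem.List.pyGetD_natCast]
  by_cases hlast : k = arr.length - 1
  · rw [if_pos (by omega)]
    have hnx : pvNext arr.length k = 0 := by unfold pvNext; rw [if_pos (by omega)]
    rw [hnx, PySem.List.pyGetD_zero]
    by_cases h0 : k = 0
    · -- single-guest arrangement: arr[k-1] is arr[-1], the last (= only) element
      have : ((k : Int) - 1) = -1 := by omega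
      rw [this, PySem.List.pyGetD_neg_one _ _ hne, pv_getLast_eq_getD _ hne]
      have hpv : pvPrev arr.length k = arr.length - 1 := by unfold pvPrev; rw [if_pos (by omega)]
      rw [hpv]
      ring
    · have : ((k : Int) - 1) = ((k - 1 : Nat) : Int) := by omega
      rw [this, PySem.List.pyGetD_natCast]
      have hpv : pvPrev arr.length k = k - 1 := by unfold pvPrev; rw [if_neg (by omega)]
      rw [hpv]
      ring
  · rw [if_neg (by omega)]
    have hnx : pvNext arr.length k = k + 1 := by unfold pvNext; rw [if_neg (by omega)]
    have hcast : ((k : Int) + 1) = ((k + 1 : Nat) : Int) := by omega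
    by_cases h0 : k = 0
    · rw [if_pos (by omega)]
      rw [hcast, PySem.List.pyGetD_natCast, hnx]
      rw [PySem.List.pyGetD_neg_one _ _ hne, pv_getLast_eq_getD _ hne]
      have hpv : pvPrev arr.length k = arr.length - 1 := by unfold pvPrev; rw [if_pos (by omega)]
      rw [hpv]
      ring
    · rw [if_neg (by omega)]
      rw [hcast, PySem.List.pyGetD_natCast, hnx]
      have : ((k : Int) - 1) = ((k - 1 : Nat) : Int) := by omega
      rw [this, PySem.List.pyGetD_natCast]
      have hpv : pvPrev arr.length k = k - 1 := by unfold pvPrev; rw [if_neg (by omega)]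
      rw [hpv]
      ring

-- A's inner loop equals the edge sum over the circular pairs
theorem pv_inner_eq (hd : List (String × List (String × Int))) (arr : List String) :
    pvAInner hd arr
      = ((arr.zip (arr.drop 1 ++ arr.take 1)).map
          (fun p => pvBoth hd p.1 p.2)).sum := by
  unfold pvAInner
  rw [pv_zip_char, List.map_map]
  rw [PySem.List.pyRange_zero_natCast, List.foldl_map]
  rw [PySem.List.foldl_congr_mem (List.range arr.length) _
      (fun (counter : Int) (k : Nat) =>
        counter + (pvLook hd (arr.getD k "") (arr.getD (pvNext arr.length k) "")
                 + pvLook hd (arr.getD k "") (arr.getD (pvPrev arr.length k) ""))) 0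
      (fun c k hk => pv_term hd arr c k (List.mem_range.mp hk))]
  rw [PySem.List.foldl_add]
  rw [PySem.List.sum_map_add_int]
  simp only [Function.comp_def, pvBoth]
  rw [PySem.List.sum_map_add_int]
  rw [pv_sum_rot arr.length (fun a b => pvLook hd (arr.getD a "") (arr.getD b ""))]
  ring

-- B's chain equals the edge sum over the open consecutive pairs
theorem pv_chain_eq (hd : List (String × List (String × Int))) (arr : List String) :
    pvChain hd arr = ((arr.zip (arr.drop 1)).map (fun p => pvBoth hd p.1 p.2)).sum := by
  induction arr with
  | nil => simp [pvChain]
  | cons x t ih =>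
    cases t with
    | nil => simp [pvChain]
    | cons y rest =>
      simp only [pvChain, List.drop_one, List.tail_cons, List.zip_cons_cons, List.map_cons,
        List.sum_cons]
      rw [ih]
      simp

-- splitting the circular pairs into the open chain plus the closing edge
theorem pv_zip_split (arr : List String) (h : arr ≠ []) :
    arr.zip (arr.drop 1 ++ arr.take 1)
      = arr.zip (arr.drop 1) ++ [(arr.getLastD "", arr.headD "")] := by
  have hlen : arr.dropLast.length = (arr.drop 1).length := by simp
  have key : arr.zip (arr.drop 1 ++ arr.take 1)
      = (arr.dropLast ++ [arr.getLast h]).zip (arr.drop 1 ++ arr.take 1) := by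
    rw [List.dropLast_append_getLast h]
  rw [key, List.zip_append hlen]
  have htake : arr.take 1 = [arr.headD ""] := by
    cases arr with
    | nil => exact absurd rfl h
    | cons a t => simp
  rw [htake]
  have hzip1 : [arr.getLast h].zip [arr.headD ""] = [(arr.getLastD "", arr.headD "")] := by
    simp [List.getLastD_eq_getLast?, List.getLast?_eq_some_getLast h]
  rw [hzip1]
  congr 1
  have : arr.zip (arr.drop 1) = arr.dropLast.zip (arr.drop 1) := by
    apply List.ext_getElem
    · simp [List.length_zip]
    · intro j h1 h2
      simp [List.getElem_zip, List.getElem_dropLast]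
  rw [this]

-- ===== VERDICT (by name: the statement is the Claim_ definition above) =====
theorem count_happiness_spec : Claim_equal_count_happiness := by
  intro arrangements hd _ _
  unfold Spec_count_happiness count_happiness_alt
  rw [count_happiness_eq, PySem.List.foldl_append_singleton_eq_map]
  refine List.map_congr_left (fun arr _ => ?_)
  rw [pv_inner_eq]
  by_cases h : arr = []
  · subst h; simp
  · rw [if_neg (by simpa [List.isEmpty_iff] using h)]
    rw [pv_zip_split arr h, List.map_append, List.sum_append, pv_chain_eq]
    simp
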